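-- pv_equiv track=rewrite | github.com/saisriharsha19/studio | backend/prompt_templates.py | _get_recommended_optimization_type
-- ===== SOURCE A (Python) =====
-- from typing import Dict, Optional, Any, List
--
-- def _get_recommended_optimization_type(reasons: List[str]) -> str:
--     """Determine the recommended optimization type based on reasons"""
--     if any("bias" in reason.lower() or "toxicity" in reason.lower() for reason in reasons):
--         return "DeepEval Safety Optimization"
--     elif any("success rate" in reason.lower() for reason in reasons):
--         return "DSPy Performance Optimization"
--     elif any("usage" in reason.lower() for reason in reasons):
--         return "Comprehensive Optimization (DSPy + DeepEval)"
--     else: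
--         return "General Quality Optimization"
-- ===== SOURCE B (Python) =====
-- from typing import List
--
-- def _get_recommended_optimization_type(reasons: List[str]) -> str:
--     has_safety = has_success = has_usage = False
--     for reason in reasons:
--         r = reason.lower()
--         if "bias" in r or "toxicity" in r:
--             has_safety = True
--         if "success rate" in r:
--             has_success = True
--         if "usage" in r:
--             has_usage = True
--     if has_safety:
--         return "DeepEval Safety Optimization"
--     elif has_success:
--         return "DSPy Performance Optimization"
--     elif has_usage:
--         return "Comprehensive Optimization (DSPy + DeepEval)"
--     else:
--         return "General Quality Optimization"
-- ===== Notes on version B (the rewrite author's own statement) =====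
-- stated objective: faster
-- what changed: A makes up to three separate short-circuit any() scans over the list (re-lowercasing each string per scan); B makes one accumulating pass that lowercases each string once and sets three boolean flags, then decides via a single if/elif ladder.
import Mathlib
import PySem

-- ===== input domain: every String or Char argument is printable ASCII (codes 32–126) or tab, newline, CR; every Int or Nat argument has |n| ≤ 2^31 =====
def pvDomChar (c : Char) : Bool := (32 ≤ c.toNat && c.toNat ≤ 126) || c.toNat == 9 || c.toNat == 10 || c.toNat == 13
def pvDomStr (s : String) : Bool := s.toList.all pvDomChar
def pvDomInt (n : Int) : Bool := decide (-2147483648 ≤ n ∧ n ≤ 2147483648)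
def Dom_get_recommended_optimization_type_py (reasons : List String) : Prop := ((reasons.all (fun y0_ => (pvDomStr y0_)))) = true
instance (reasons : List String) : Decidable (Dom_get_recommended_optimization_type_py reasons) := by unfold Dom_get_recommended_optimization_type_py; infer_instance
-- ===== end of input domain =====

-- B replaces A's up-to-three separate short-circuit scans by one accumulating flag-setting pass
-- followed by a single decision ladder (alternative decomposition, same result).


-- ===== PORT A =====
def get_recommended_optimization_type_py (reasons : List String) : String :=
  if reasons.any (fun reason =>
      PySem.Str.isIn "bias" (PySem.Str.lower reason) || PySem.Str.isIn "toxicity" (PySem.Str.lower reason)) then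
    "DeepEval Safety Optimization"
  else if reasons.any (fun reason => PySem.Str.isIn "success rate" (PySem.Str.lower reason)) then
    "DSPy Performance Optimization"
  else if reasons.any (fun reason => PySem.Str.isIn "usage" (PySem.Str.lower reason)) then
    "Comprehensive Optimization (DSPy + DeepEval)"
  else
    "General Quality Optimization"

-- ===== PORT B =====
def get_recommended_optimization_type_py_alt (reasons : List String) : String :=
  let flags := reasons.foldl (fun (acc : Bool × Bool × Bool) reason =>
    let r := PySem.Str.lower reason
    ( acc.1 || (PySem.Str.isIn "bias" r || PySem.Str.isIn "toxicity" r),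
      acc.2.1 || PySem.Str.isIn "success rate" r,
      acc.2.2 || PySem.Str.isIn "usage" r)) (false, false, false)
  if flags.1 then "DeepEval Safety Optimization"
  else if flags.2.1 then "DSPy Performance Optimization"
  else if flags.2.2 then "Comprehensive Optimization (DSPy + DeepEval)"
  else "General Quality Optimization"

-- ===== PRECONDITION & SPEC =====
def Spec_get_recommended_optimization_type_py (reasons : List String) (out : String) : Prop := out = get_recommended_optimization_type_py_alt reasons
instance (reasons : List String) (out : String) : Decidable (Spec_get_recommended_optimization_type_py reasons out) := by unfold Spec_get_recommended_optimization_type_py; infer_instance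

-- ===== CLAIM (what is proved, stated in full; the proofs are below) =====
def Claim_equal_get_recommended_optimization_type_py : Prop := ∀ (reasons : List String), Dom_get_recommended_optimization_type_py reasons → Spec_get_recommended_optimization_type_py reasons (get_recommended_optimization_type_py reasons)

-- ===== LEMMAS AND PROOFS =====
theorem flags_foldl_eq (reasons : List String) (a b c : Bool) :
    reasons.foldl (fun (acc : Bool × Bool × Bool) reason =>
      let r := PySem.Str.lower reason
      ( acc.1 || (PySem.Str.isIn "bias" r || PySem.Str.isIn "toxicity" r),
        acc.2.1 || PySem.Str.isIn "success rate" r,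
        acc.2.2 || PySem.Str.isIn "usage" r)) (a, b, c)
    = ( a || reasons.any (fun reason =>
          PySem.Str.isIn "bias" (PySem.Str.lower reason) || PySem.Str.isIn "toxicity" (PySem.Str.lower reason)),
        b || reasons.any (fun reason => PySem.Str.isIn "success rate" (PySem.Str.lower reason)),
        c || reasons.any (fun reason => PySem.Str.isIn "usage" (PySem.Str.lower reason))) := by
  induction reasons generalizing a b c with
  | nil => simp
  | cons h t ih =>
    simp only [List.foldl_cons, List.any_cons, ih]
    simp [Bool.or_assoc]

-- ===== VERDICT (by name: the statement is the Claim_ definition above) =====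
theorem get_recommended_optimization_type_py_spec : Claim_equal_get_recommended_optimization_type_py := by
  intro reasons _
  unfold Spec_get_recommended_optimization_type_py get_recommended_optimization_type_py get_recommended_optimization_type_py_alt
  simp only [flags_foldl_eq, Bool.false_or]
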